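-- pv_equiv track=rewrite | github.com/AfterWorld/ultcogs | berribounty/utils/validators.py | validate_devil_fruit_name
-- ===== SOURCE A (Python) =====
-- from typing import Any, Union, List, Dict
--
-- def validate_devil_fruit_name(fruit_name: str, available_fruits: List[str]) -> tuple:
--     """
--     Validate devil fruit name.
--
--     Returns:
--         tuple: (is_valid: bool, error_message: str or None, closest_match: str or None)
--     """
--     if not fruit_name:
--         return False, "Please provide a fruit name.", None
--
--     # Exact match
--     if fruit_name.lower() in [f.lower() for f in available_fruits]:
--         return True, None, fruit_name
--
--     # Partial match
--     partial_matches = [f for f in available_fruits if fruit_name.lower() in f.lower()]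
--     if len(partial_matches) == 1:
--         return True, None, partial_matches[0]
--     elif len(partial_matches) > 1:
--         return False, f"Multiple fruits match '{fruit_name}': {', '.join(partial_matches[:3])}", None
--
--     # No match found
--     closest = find_closest_match(fruit_name, available_fruits)
--     return False, f"Fruit '{fruit_name}' not found.", closest
--
-- def find_closest_match(target: str, options: List[str], max_distance: int = 3) -> str:
--     """
--     Find the closest string match using Levenshtein distance.
--
--     Returns:
--         str or None: Closest match if within max_distance, otherwise None
--     """
--     def levenshtein_distance(s1: str, s2: str) -> int:
--         """Calculate Levenshtein distance between two strings."""
--         if len(s1) < len(s2):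
--             return levenshtein_distance(s2, s1)
--
--         if len(s2) == 0:
--             return len(s1)
--
--         previous_row = range(len(s2) + 1)
--         for i, c1 in enumerate(s1):
--             current_row = [i + 1]
--             for j, c2 in enumerate(s2):
--                 insertions = previous_row[j + 1] + 1
--                 deletions = current_row[j] + 1
--                 substitutions = previous_row[j] + (c1 != c2)
--                 current_row.append(min(insertions, deletions, substitutions))
--             previous_row = current_row
--
--         return previous_row[-1]
--
--     target_lower = target.lower()
--     best_match = None
--     min_distance = float('inf')
--
--     for option in options:
--         distance = levenshtein_distance(target_lower, option.lower())
--         if distance < min_distance: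
--             min_distance = distance
--             best_match = option
--
--     return best_match if min_distance <= max_distance else None
-- ===== SOURCE B (Python) =====
-- from functools import lru_cache
-- from typing import List
--
--
-- def validate_devil_fruit_name(fruit_name: str, available_fruits: List[str]) -> tuple:
--     if not fruit_name:
--         return False, "Please provide a fruit name.", None
--     target = fruit_name.lower()
--     # single pass: exact-match flag and partial-match list together
--     exact = False
--     partial = []
--     for f in available_fruits:
--         low = f.lower()
--         exact = exact or (low == target)
--         if target in low:
--             partial.append(f)
--     if exact:
--         return True, None, fruit_name
--     if len(partial) == 1:
--         return True, None, partial[0]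
--     if not partial:
--         return False, f"Fruit '{fruit_name}' not found.", _closest(target, available_fruits)
--     return False, f"Multiple fruits match '{fruit_name}': {', '.join(partial[:3])}", None
--
--
-- def _closest(target: str, options: List[str], max_distance: int = 3) -> str:
--     """First option with minimal edit distance to target, if within max_distance."""
--     if not options:
--         return None
--     best = min(options, key=lambda o: _edit(target, o.lower()))
--     return best if _edit(target, best.lower()) <= max_distance else None
--
--
-- def _edit(a: str, b: str) -> int:
--     """Levenshtein distance via memoized recursion on prefix lengths."""
--
--     @lru_cache(maxsize=None)
--     def e(i: int, j: int) -> int: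
--         if i == 0:
--             return j
--         if j == 0:
--             return i
--         return min(e(i - 1, j) + 1,
--                    e(i, j - 1) + 1,
--                    e(i - 1, j - 1) + (a[i - 1] != b[j - 1]))
--
--     return e(len(a), len(b))
-- ===== Notes on version B (the rewrite author's own statement) =====
-- stated objective: alternative
-- what changed: B folds the exact-match test and the partial-match collection into a single pass over the fruit list, and replaces the hand-rolled two-row iterative Levenshtein plus explicit best/min-distance tracking loop by a memoized recursive edit distance used as the key of min(options, key=...).
import Mathlib
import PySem

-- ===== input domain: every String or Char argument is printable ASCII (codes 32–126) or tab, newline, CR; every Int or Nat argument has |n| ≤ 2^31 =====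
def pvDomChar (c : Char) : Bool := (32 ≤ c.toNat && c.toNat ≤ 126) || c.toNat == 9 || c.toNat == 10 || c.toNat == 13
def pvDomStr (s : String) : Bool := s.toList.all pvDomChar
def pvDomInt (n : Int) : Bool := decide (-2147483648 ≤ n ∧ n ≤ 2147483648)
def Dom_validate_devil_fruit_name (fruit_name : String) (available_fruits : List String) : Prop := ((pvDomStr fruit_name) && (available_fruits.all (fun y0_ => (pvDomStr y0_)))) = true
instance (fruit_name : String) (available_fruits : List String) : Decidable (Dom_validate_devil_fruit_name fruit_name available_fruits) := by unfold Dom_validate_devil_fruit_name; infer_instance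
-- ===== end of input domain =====

-- B replaces A's two scans + hand-rolled row-DP Levenshtein by a single collecting pass over the
-- fruit list and a memoized prefix-recursive edit distance with min(options, key=…); same values.

-- ===== PORT A =====

-- inner row-by-row Levenshtein of A's `levenshtein_distance` (after the possible swap);
-- `previous_row[-1]` is PySem.List.pyGetD … (-1).
def pvLevCore (s1 s2 : List Char) : Nat :=
  if s2.length = 0 then s1.length
  else
    let prev0 := List.range (s2.length + 1)
    let final := s1.zipIdx.foldl (fun prev (ci : Char × Nat) =>
      s2.zipIdx.foldl (fun cur (cj : Char × Nat) =>
        cur ++ [min (prev.getD (cj.2 + 1) 0 + 1)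
               (min (cur.getD cj.2 0 + 1)
                    (prev.getD cj.2 0 + (if ci.1 = cj.1 then 0 else 1)))])
        [ci.2 + 1]) prev0
    PySem.List.pyGetD final (-1) 0

-- A's `levenshtein_distance` with its swap branch unfolded once (the recursive call cannot swap again)
def pvLev (s1 s2 : List Char) : Nat :=
  if s1.length < s2.length then pvLevCore s2 s1 else pvLevCore s1 s2

-- A's `find_closest_match` (max_distance kept as the explicit parameter; float('inf') = the `none` state)
def pvFCMStep (target_lower : List Char) (acc : Option String × Option Nat) (option : String) : Option String × Option Nat :=
  let d := pvLev target_lower (PySem.Str.lower option).toList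
  match acc.2 with
  | none => (some option, some d)
  | some m => if d < m then (some option, some d) else acc

def find_closest_match (target : String) (options : List String) (max_distance : Int) : Option String :=
  match options.foldl (pvFCMStep (PySem.Str.lower target).toList) (none, none) with
  | (_, none) => none
  | (b, some m) => if (m : Int) ≤ max_distance then b else none

def validate_devil_fruit_name (fruit_name : String) (available_fruits : List String) : Bool × Option String × Option String :=
  if fruit_name = "" then (false, some "Please provide a fruit name.", none)
  else if (available_fruits.map (fun f => PySem.Str.lower f)).contains (PySem.Str.lower fruit_name) then
    (true, none, some fruit_name)
  else
    let partial_matches := available_fruits.filter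
      (fun f => PySem.Str.isIn (PySem.Str.lower fruit_name) (PySem.Str.lower f))
    if partial_matches.length = 1 then (true, none, some (partial_matches.getD 0 ""))
    else if partial_matches.length > 1 then
      (false, some ("Multiple fruits match '" ++ fruit_name ++ "': "
                    ++ PySem.Str.join ", " (partial_matches.take 3)), none)
    else
      (false, some ("Fruit '" ++ fruit_name ++ "' not found."),
       find_closest_match fruit_name available_fruits 3)

-- ===== PORT B =====

-- Source B's memoized `e(i, j)` on prefix lengths; the lru_cache is made explicit as the memo
-- dictionary threaded through the recursion (same recursion, same base cases, same recurrence).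
def pvEditRec (a b : List Char) : Nat → Nat → PySem.Dict (Nat × Nat) Nat → Nat × PySem.Dict (Nat × Nat) Nat
  | 0, j, memo => (j, memo)
  | i+1, 0, memo => (i+1, memo)
  | i+1, j+1, memo =>
    match PySem.Dict.get? memo (i+1, j+1) with
    | some v => (v, memo)
    | none =>
      let r1 := pvEditRec a b i (j+1) memo
      let r2 := pvEditRec a b (i+1) j r1.2
      let r3 := pvEditRec a b i j r2.2
      let d := min (r1.1 + 1) (min (r2.1 + 1)
        (r3.1 + (if a.getD i ' ' = b.getD j ' ' then 0 else 1)))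
      (d, PySem.Dict.insert r3.2 (i+1, j+1) d)
  termination_by i j _ => (i, j)

-- Source B's `_edit(a, b)` = `e(len(a), len(b))` starting from an empty cache
def pvEdit (a b : List Char) : Nat := (pvEditRec a b a.length b.length PySem.Dict.empty).1

-- Source B's `_closest` (max_distance = 3 at both call sites)
def pvClosest (target : String) (options : List String) : Option String :=
  if options = [] then none
  else
    match PySem.List.min? options
        (fun o => pvEdit target.toList (PySem.Str.lower o).toList) with
    | none => none
    | some best =>
      if pvEdit target.toList (PySem.Str.lower best).toList ≤ 3 then some best else none

def validate_devil_fruit_name_alt (fruit_name : String) (available_fruits : List String) : Bool × Option String × Option String :=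
  if fruit_name = "" then (false, some "Please provide a fruit name.", none)
  else
    let target := PySem.Str.lower fruit_name
    let st := available_fruits.foldl (fun (acc : Bool × List String) f =>
        let low := PySem.Str.lower f
        (acc.1 || (low == target),
         if PySem.Str.isIn target low then acc.2 ++ [f] else acc.2))
      (false, [])
    if st.1 then (true, none, some fruit_name)
    else
      match st.2 with
      | [p] => (true, none, some p)
      | [] => (false, some ("Fruit '" ++ fruit_name ++ "' not found."), pvClosest target available_fruits)
      | ps => (false, some ("Multiple fruits match '" ++ fruit_name ++ "': "
                            ++ PySem.Str.join ", " (ps.take 3)), none)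

-- ===== PRECONDITION & SPEC =====
def Spec_validate_devil_fruit_name (fruit_name : String) (available_fruits : List String) (out : Bool × Option String × Option String) : Prop := out = validate_devil_fruit_name_alt fruit_name available_fruits
instance (fruit_name : String) (available_fruits : List String) (out : Bool × Option String × Option String) : Decidable (Spec_validate_devil_fruit_name fruit_name available_fruits out) := by unfold Spec_validate_devil_fruit_name; infer_instance

-- ===== CLAIM (what is proved, stated in full; the proofs are below) =====
def Claim_equal_validate_devil_fruit_name : Prop := ∀ (fruit_name : String) (available_fruits : List String), Dom_validate_devil_fruit_name fruit_name available_fruits → Spec_validate_devil_fruit_name fruit_name available_fruits (validate_devil_fruit_name fruit_name available_fruits)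

-- ===== LEMMAS AND PROOFS =====

-- proof-side specification of the edit distance: Source B's recursion without the cache, phrased on
-- the reversed lists so that removing the last character of a prefix is a head pattern
def pvEditRow (x : Char) (f : List Char → Nat) (la : Nat) : List Char → Nat
  | [] => la + 1
  | y :: b => min (f (y :: b) + 1)
                (min (pvEditRow x f la b + 1) (f b + (if x = y then 0 else 1)))

def pvEditGo : List Char → List Char → Nat
  | [], b => b.length
  | x :: a, b => pvEditRow x (pvEditGo a) a.length b

-- `pvEditGo` value on the reversed length-i/length-j prefixes of a and b (= Python's e(i, j))
def pvPre (a b : List Char) (i j : Nat) : Nat :=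
  pvEditGo ((a.take i).reverse) ((b.take j).reverse)

def pvMemoOK (a b : List Char) (memo : PySem.Dict (Nat × Nat) Nat) : Prop :=
  ∀ p v, PySem.Dict.get? memo p = some v → v = pvPre a b p.1 p.2

theorem pvEditGo_nil_right (a : List Char) : pvEditGo a [] = a.length := by
  cases a <;> simp [pvEditGo, pvEditRow]

theorem pvEditGo_cons_cons (x y : Char) (a b : List Char) :
    pvEditGo (x :: a) (y :: b)
      = min (pvEditGo a (y :: b) + 1)
          (min (pvEditGo (x :: a) b + 1) (pvEditGo a b + (if x = y then 0 else 1))) := by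
  simp [pvEditGo, pvEditRow]

theorem pvEditGo_symm (a b : List Char) : pvEditGo a b = pvEditGo b a := by
  induction a generalizing b with
  | nil => simp [pvEditGo, pvEditGo_nil_right]
  | cons x a iha =>
    induction b with
    | nil => simp [pvEditGo, pvEditRow]
    | cons y b ihb =>
      rw [pvEditGo_cons_cons, pvEditGo_cons_cons, iha (y :: b), ihb, iha b]
      have hc : (if x = y then 0 else 1) = (if y = x then (0:Nat) else 1) := by
        by_cases h : x = y <;> simp [h, Ne.symm]
      rw [hc]; omega

-- row after the outer loop has consumed `d` (so `prev[j] = edit distance of d and s2.take j`)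
def pvRowOf (s2 d : List Char) : List Nat :=
  (List.range (s2.length + 1)).map (fun j => pvEditGo d.reverse ((s2.take j).reverse))

theorem pvRowOf_getD (s2 d : List Char) (j : Nat) (hj : j ≤ s2.length) :
    (pvRowOf s2 d).getD j 0 = pvEditGo d.reverse ((s2.take j).reverse) := by
  simp [pvRowOf, List.getD, List.getElem?_map, List.getElem?_range (by omega : j < s2.length + 1)]

theorem pvInner_fold (s2 d : List Char) (c1 : Char) :
    ∀ (rest : List Char) (j : Nat), j + rest.length = s2.length → s2.take j ++ rest = s2 →
    (rest.zipIdx j).foldl (fun cur (cj : Char × Nat) =>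
        cur ++ [min ((pvRowOf s2 d).getD (cj.2 + 1) 0 + 1)
               (min (cur.getD cj.2 0 + 1)
                    ((pvRowOf s2 d).getD cj.2 0 + (if c1 = cj.1 then 0 else 1)))])
      ((List.range (j + 1)).map (fun k => pvEditGo (c1 :: d.reverse) ((s2.take k).reverse)))
    = pvRowOf s2 (d ++ [c1]) := by
  intro rest
  induction rest with
  | nil =>
    intro j hlen _
    simp at hlen
    simp [List.zipIdx, pvRowOf, hlen]
  | cons c2 rest ih =>
    intro j hlen htake
    have hj : j < s2.length := by simp at hlen; omega
    have hchar : s2.take (j + 1) = s2.take j ++ [c2] := by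
      have : s2.take (j+1) = s2.take j ++ (s2.drop j).take 1 := by
        rw [← List.take_add]
      have hdrop : s2.drop j = c2 :: rest := by
        have hlentake : (s2.take j).length = j := by
          simp [Nat.le_of_lt hj]
        calc s2.drop j = (s2.take j ++ (c2 :: rest)).drop j := by rw [htake]
          _ = c2 :: rest := by
              rw [List.drop_append_of_le_length (by omega)]
              simp
      rw [this, hdrop]; simp
    rw [List.zipIdx_cons, List.foldl_cons]
    have hstep :
        ((List.range (j + 1)).map (fun k => pvEditGo (c1 :: d.reverse) ((s2.take k).reverse)))
          ++ [min ((pvRowOf s2 d).getD (j + 1) 0 + 1)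
               (min ((((List.range (j + 1)).map (fun k => pvEditGo (c1 :: d.reverse) ((s2.take k).reverse))).getD j 0) + 1)
                    ((pvRowOf s2 d).getD j 0 + (if c1 = c2 then 0 else 1)))]
        = (List.range (j + 1 + 1)).map (fun k => pvEditGo (c1 :: d.reverse) ((s2.take k).reverse)) := by
      rw [pvRowOf_getD s2 d (j+1) (by omega), pvRowOf_getD s2 d j (by omega)]
      have hcurj : (((List.range (j + 1)).map (fun k => pvEditGo (c1 :: d.reverse) ((s2.take k).reverse))).getD j 0)
          = pvEditGo (c1 :: d.reverse) ((s2.take j).reverse) := by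
        simp [List.getD]
      rw [hcurj]
      have hrev : (s2.take (j+1)).reverse = c2 :: (s2.take j).reverse := by
        rw [hchar]; simp
      have hnew : pvEditGo (c1 :: d.reverse) ((s2.take (j+1)).reverse)
          = min (pvEditGo d.reverse ((s2.take (j+1)).reverse) + 1)
              (min (pvEditGo (c1 :: d.reverse) ((s2.take j).reverse) + 1)
                (pvEditGo d.reverse ((s2.take j).reverse) + (if c1 = c2 then 0 else 1))) := by
        rw [hrev, pvEditGo_cons_cons]
      rw [List.range_succ (n := j + 1)]
      simp [hnew]
    rw [hstep]
    exact ih (j + 1) (by simp at hlen ⊢; omega)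
      (by rw [hchar]; simpa using htake)

theorem pvOuter_fold (s1 s2 : List Char) :
    ∀ (rest : List Char) (d : List Char), d ++ rest = s1 →
    (rest.zipIdx d.length).foldl (fun prev (ci : Char × Nat) =>
      s2.zipIdx.foldl (fun cur (cj : Char × Nat) =>
        cur ++ [min (prev.getD (cj.2 + 1) 0 + 1)
               (min (cur.getD cj.2 0 + 1)
                    (prev.getD cj.2 0 + (if ci.1 = cj.1 then 0 else 1)))])
        [ci.2 + 1]) (pvRowOf s2 d)
    = pvRowOf s2 s1 := by
  intro rest
  induction rest with
  | nil => intro d hd; simp at hd; simp [List.zipIdx, hd]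
  | cons c1 rest ih =>
    intro d hd
    rw [List.zipIdx_cons, List.foldl_cons]
    have hstart : [d.length + 1]
        = (List.range (0 + 1)).map (fun k => pvEditGo (c1 :: d.reverse) ((s2.take k).reverse)) := by
      simp [pvEditGo, pvEditRow, List.range_succ]
    have hinner := pvInner_fold s2 d c1 s2 0 (by simp) (by simp)
    rw [show (s2.zipIdx : List (Char × Nat)) = s2.zipIdx 0 from rfl] at *
    rw [hstart, hinner]
    have : (d ++ [c1]).length = d.length + 1 := by simp
    rw [show d.length + 1 = (d ++ [c1]).length by simp]
    exact ih (d ++ [c1]) (by simpa using hd)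

theorem pvLevCore_eq (s1 s2 : List Char) : pvLevCore s1 s2 = pvEditGo s1.reverse s2.reverse := by
  unfold pvLevCore
  by_cases h : s2.length = 0
  · have : s2 = [] := List.length_eq_zero_iff.mp h
    simp [this, pvEditGo_nil_right]
  · simp only [h, if_false]
    have h0 : List.range (s2.length + 1) = pvRowOf s2 [] := by
      simp [pvRowOf, pvEditGo]
      apply List.ext_getElem <;> simp
    have hfold := pvOuter_fold s1 s2 s1 [] (by simp)
    simp only [List.length_nil] at hfold
    rw [show (s1.zipIdx : List (Char × Nat)) = s1.zipIdx 0 from rfl, h0, hfold]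
    have hlen : (pvRowOf s2 s1).length = s2.length + 1 := by simp [pvRowOf]
    have hne : 0 < s2.length := by omega
    simp only [PySem.List.pyGetD, PySem.List.pyGet?, PySem.List.pyIdx?, hlen]
    norm_num
    have : s2.length + 1 - 1 = s2.length := by omega
    simp [pvRowOf, List.take_of_length_le (le_refl s2.length)]

theorem pvPre_succ_succ (a b : List Char) (i j : Nat) (hi : i < a.length) (hj : j < b.length) :
    pvPre a b (i+1) (j+1)
      = min (pvPre a b i (j+1) + 1)
          (min (pvPre a b (i+1) j + 1)
            (pvPre a b i j + (if a.getD i ' ' = b.getD j ' ' then 0 else 1))) := by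
  have ha : (a.take (i+1)).reverse = a[i] :: (a.take i).reverse := by
    rw [List.take_add_one, List.getElem?_eq_getElem hi]; simp
  have hb : (b.take (j+1)).reverse = b[j] :: (b.take j).reverse := by
    rw [List.take_add_one, List.getElem?_eq_getElem hj]; simp
  have hga : a.getD i ' ' = a[i] := by simp [List.getD, List.getElem?_eq_getElem hi]
  have hgb : b.getD j ' ' = b[j] := by simp [List.getD, List.getElem?_eq_getElem hj]
  unfold pvPre
  rw [ha, hb, pvEditGo_cons_cons, hga, hgb, ← ha, ← hb]

theorem pvEditRec_spec (a b : List Char) :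
    ∀ (n i j : Nat) (memo : PySem.Dict (Nat × Nat) Nat),
      i + j ≤ n → i ≤ a.length → j ≤ b.length → pvMemoOK a b memo →
      (pvEditRec a b i j memo).1 = pvPre a b i j
        ∧ pvMemoOK a b (pvEditRec a b i j memo).2 := by
  intro n
  induction n with
  | zero =>
    intro i j memo h hi hj hm
    have hi0 : i = 0 := by omega
    have hj0 : j = 0 := by omega
    subst hi0; subst hj0
    exact ⟨by simp [pvEditRec, pvPre, pvEditGo], by simpa [pvEditRec] using hm⟩
  | succ n ih =>
    intro i j memo h hi hj hm
    match i, j with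
    | 0, j =>
      refine ⟨?_, by simpa [pvEditRec] using hm⟩
      simp [pvEditRec, pvPre, pvEditGo, Nat.min_eq_left hj]
    | i+1, 0 =>
      refine ⟨?_, by simpa [pvEditRec] using hm⟩
      simp [pvEditRec, pvPre, pvEditGo_nil_right, Nat.min_eq_left hi]
    | i+1, j+1 =>
      rw [pvEditRec]
      cases hget : PySem.Dict.get? memo (i+1, j+1) with
      | some v =>
        exact ⟨(hm _ _ hget).symm ▸ rfl, hm⟩
      | none =>
        simp only []
        have h1 := ih i (j+1) memo (by omega) (by omega) hj hm
        have h2 := ih (i+1) j (pvEditRec a b i (j+1) memo).2 (by omega) hi (by omega) h1.2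
        have h3 := ih i j (pvEditRec a b (i+1) j (pvEditRec a b i (j+1) memo).2).2
          (by omega) (by omega) (by omega) h2.2
        constructor
        · rw [h1.1, h2.1, h3.1, ← pvPre_succ_succ a b i j (by omega) (by omega)]
        · intro p v hp
          by_cases hpk : p = (i+1, j+1)
          · subst hpk
            rw [PySem.Dict.get?_insert_self] at hp
            cases hp
            rw [h1.1, h2.1, h3.1, ← pvPre_succ_succ a b i j (by omega) (by omega)]
          · rw [PySem.Dict.get?_insert_of_ne _ _ hpk] at hp
            exact h3.2 p v hp

theorem pvEdit_eq (a b : List Char) : pvEdit a b = pvEditGo a.reverse b.reverse := by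
  have hempty : pvMemoOK a b PySem.Dict.empty := by
    intro p v hp
    simp [PySem.Dict.get?, PySem.Dict.empty] at hp
  have := (pvEditRec_spec a b (a.length + b.length) a.length b.length PySem.Dict.empty
    (le_refl _) (le_refl _) (le_refl _) hempty).1
  unfold pvEdit
  rw [this]
  simp [pvPre]

theorem pvLev_eq (s1 s2 : List Char) : pvLev s1 s2 = pvEdit s1 s2 := by
  rw [pvEdit_eq]
  unfold pvLev
  by_cases h : s1.length < s2.length
  · simp only [h, if_true]
    rw [pvLevCore_eq, pvEditGo_symm]
  · simp only [h, if_false]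
    rw [pvLevCore_eq]

theorem pvMinFold (k : String → Nat) :
    ∀ (l : List String) (acc : Option String),
    l.foldl (fun (acc : Option String × Option Nat) option =>
      match acc.2 with
      | none => (some option, some (k option))
      | some m => if k option < m then (some option, some (k option)) else acc)
      (acc, acc.map k)
    = (l.foldl (fun acc x =>
        match acc with
        | none => some x
        | some m => if k x < k m then some x else some m) acc,
       (l.foldl (fun acc x =>
        match acc with
        | none => some x
        | some m => if k x < k m then some x else some m) acc).map k) := by
  intro l
  induction l with
  | nil => intro acc; simp
  | cons o t ih =>
    intro acc
    cases acc with
    | none => simpa using ih (some o)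
    | some b =>
      by_cases h : k o < k b
      · simpa [h] using ih (some o)
      · simpa [h] using ih (some b)

theorem pvFCMStep_eq (tl : List Char) :
    pvFCMStep tl = (fun (acc : Option String × Option Nat) option =>
      match acc.2 with
      | none => (some option, some (pvEdit tl (PySem.Str.lower option).toList))
      | some m => if pvEdit tl (PySem.Str.lower option).toList < m
                  then (some option, some (pvEdit tl (PySem.Str.lower option).toList)) else acc) := by
  funext acc option
  simp only [pvFCMStep, pvLev_eq]

theorem pvClosest_eq (fruit_name : String) (options : List String) :
    find_closest_match fruit_name options 3
      = pvClosest (PySem.Str.lower fruit_name) options := by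
  unfold find_closest_match pvClosest
  rw [pvFCMStep_eq]
  have hfold := pvMinFold
    (fun o => pvEdit (PySem.Str.lower fruit_name).toList (PySem.Str.lower o).toList) options none
  simp only [Option.map_none] at hfold
  rw [hfold]
  have hmin : PySem.List.min? options
      (fun o => pvEdit (PySem.Str.lower fruit_name).toList (PySem.Str.lower o).toList)
      = options.foldl (fun acc x =>
        match acc with
        | none => some x
        | some m =>
          if pvEdit (PySem.Str.lower fruit_name).toList (PySem.Str.lower x).toList
             < pvEdit (PySem.Str.lower fruit_name).toList (PySem.Str.lower m).toList
          then some x else some m) none := by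
    unfold PySem.List.min?
    congr 1
    funext acc x
    cases acc <;> rfl
  rw [← hmin]
  cases hopt : options with
  | nil => simp [PySem.List.min?]
  | cons o t =>
    cases hmo : PySem.List.min? (o :: t)
        (fun o => pvEdit (PySem.Str.lower fruit_name).toList (PySem.Str.lower o).toList) with
    | none =>
      exact absurd ((PySem.List.min?_eq_none_iff _ _).mp hmo) (by simp)
    | some m =>
      simp only [Option.map_some, if_false, reduceCtorEq]
      simp

theorem pvOrFold (t : String) :
    ∀ (l : List String) (b : Bool),
    l.foldl (fun acc f => acc || (PySem.Str.lower f == t)) b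
      = (b || l.any (fun f => PySem.Str.lower f == t)) := by
  intro l
  induction l with
  | nil => simp
  | cons x xs ih => intro b; simp [ih, Bool.or_assoc]

theorem pvAltFold (t : String) (l : List String) :
    l.foldl (fun (acc : Bool × List String) f =>
        (acc.1 || (PySem.Str.lower f == t),
         if PySem.Str.isIn t (PySem.Str.lower f) then acc.2 ++ [f] else acc.2)) (false, [])
      = (l.any (fun f => PySem.Str.lower f == t),
         l.filter (fun f => PySem.Str.isIn t (PySem.Str.lower f))) := by
  rw [PySem.List.foldl_prod_mk (fun b e => b || (PySem.Str.lower e == t))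
      (fun r e => if PySem.Str.isIn t (PySem.Str.lower e) then r ++ [e] else r) l false []]
  rw [pvOrFold]
  have h2 := PySem.List.foldl_append_if (fun f => PySem.Str.isIn t (PySem.Str.lower f))
    (fun x => x) l []
  simp only [List.map_id_fun', id, List.nil_append] at h2
  rw [h2]
  simp

theorem pvContains_eq (t : String) (l : List String) :
    (l.map (fun f => PySem.Str.lower f)).contains t = l.any (fun f => PySem.Str.lower f == t) := by
  rw [← List.any_beq']
  simp [List.any_map, Function.comp_def]

-- ===== VERDICT (by name: the statement is the Claim_ definition above) =====
theorem validate_devil_fruit_name_spec : Claim_equal_validate_devil_fruit_name := by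
  intro fruit_name available_fruits _
  unfold Spec_validate_devil_fruit_name
  unfold validate_devil_fruit_name validate_devil_fruit_name_alt
  by_cases hfn : fruit_name = ""
  · simp [hfn]
  · simp only [hfn, if_false]
    rw [pvAltFold (PySem.Str.lower fruit_name) available_fruits]
    rw [pvContains_eq (PySem.Str.lower fruit_name) available_fruits]
    by_cases hany : available_fruits.any (fun f => PySem.Str.lower f == PySem.Str.lower fruit_name)
    · simp [hany]
    · simp only [hany, Bool.false_eq_true, if_false]
      cases hp : available_fruits.filter
          (fun f => PySem.Str.isIn (PySem.Str.lower fruit_name) (PySem.Str.lower f)) with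
      | nil => simp [pvClosest_eq]
      | cons p rest =>
        cases rest with
        | nil => simp
        | cons q rest' => simp
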